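-- pv_equiv track=rewrite | github.com/stenknutsen/HomeGrownPOSTagger | PhaseThreeTagging.py | PRP_UNK_TO_VerbTagger
-- ===== SOURCE A (Python) =====
-- def PRP_UNK_TO_VerbTagger(sent):
--     sentToReturn = []
--     skip = 0
--
--     for i in range(len(sent)):
--
--         if skip>0:
--             skip = skip -1
--             continue
--
--         if (i)<0 | (i+2)>=len(sent):
--             sentToReturn += [sent[i]]
--             continue
--
--         leftContext = sent[i]
--         target = sent[i+1]
--         rightContext = sent[i+2]
--
--         if (leftContext[1]=="PRP")&(target[1]=="UNK")&(rightContext[1]=="TO"):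
--
--             sentToReturn += [leftContext]
--             sentToReturn += [(target[0],"V")]
--             sentToReturn += [rightContext]
--             skip = 2
--
--         else:
--             sentToReturn += [leftContext]
--
--     return sentToReturn
-- ===== SOURCE B (Python) =====
-- def PRP_UNK_TO_VerbTagger(sent):
--     result = list(sent)
--     for i in range(1, len(sent) - 1):
--         if sent[i - 1][1] == "PRP" and sent[i][1] == "UNK" and sent[i + 1][1] == "TO":
--             result[i] = (sent[i][0], "V")
--     return result
-- ===== Notes on version B (the rewrite author's own statement) =====
-- stated objective: simpler
-- what changed: B replaces A's incremental list building with skip counter and triple-append by a copy of the input with in-place retagging of each middle token of a PRP-UNK-TO window (the skip is immaterial since such windows cannot overlap).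
import Mathlib
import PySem

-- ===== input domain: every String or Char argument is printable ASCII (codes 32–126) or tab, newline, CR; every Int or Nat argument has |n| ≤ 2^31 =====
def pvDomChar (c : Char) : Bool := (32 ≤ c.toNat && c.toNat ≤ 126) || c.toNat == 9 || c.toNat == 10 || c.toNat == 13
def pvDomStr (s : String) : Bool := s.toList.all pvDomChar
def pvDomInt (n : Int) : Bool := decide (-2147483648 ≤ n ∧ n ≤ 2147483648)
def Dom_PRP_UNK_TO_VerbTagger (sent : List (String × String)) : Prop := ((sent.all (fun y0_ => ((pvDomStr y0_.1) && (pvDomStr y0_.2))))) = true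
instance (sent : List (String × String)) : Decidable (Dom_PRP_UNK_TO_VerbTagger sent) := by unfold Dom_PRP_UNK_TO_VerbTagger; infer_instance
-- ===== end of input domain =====

-- B replaces A's skip-counter incremental list building by a copy of the input with in-place retagging (simpler decomposition; same return value).


-- ===== PORT A =====
-- Transliteration of A: fold over range(len(sent)) carrying (sentToReturn, skip).
-- Python's `(i)<0 | (i+2)>=len(sent)` is the chained comparison `i < (0 | (i+2)) and (0 | (i+2)) >= len(sent)`;
-- the bitwise or is ported literally with PySem.Int.bor.  sent[i] is ported with pyGetD (every access here is in range).
def PRP_UNK_TO_VerbTagger (sent : List (String × String)) : List (String × String) :=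
  ((PySem.List.pyRange 0 (sent.length : Int) 1).foldl
    (fun (st : List (String × String) × Int) i =>
      let sentToReturn := st.1
      let skip := st.2
      if skip > 0 then (sentToReturn, skip - 1)
      else if i < PySem.Int.bor 0 (i + 2) ∧ PySem.Int.bor 0 (i + 2) ≥ (sent.length : Int) then
        (sentToReturn ++ [PySem.List.pyGetD sent i ("", "")], skip)
      else
        let leftContext := PySem.List.pyGetD sent i ("", "")
        let target := PySem.List.pyGetD sent (i + 1) ("", "")
        let rightContext := PySem.List.pyGetD sent (i + 2) ("", "")
        if leftContext.2 = "PRP" ∧ target.2 = "UNK" ∧ rightContext.2 = "TO" then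
          (sentToReturn ++ [leftContext] ++ [(target.1, "V")] ++ [rightContext], 2)
        else
          (sentToReturn ++ [leftContext], skip))
    ([], 0)).1

-- ===== PORT B =====
-- Transliteration of B: result = list(sent); for i in range(1, len(sent)-1): overwrite result[i] on a match.
def PRP_UNK_TO_VerbTagger_alt (sent : List (String × String)) : List (String × String) :=
  (PySem.List.pyRange 1 ((sent.length : Int) - 1) 1).foldl
    (fun result i =>
      if (PySem.List.pyGetD sent (i - 1) ("", "")).2 = "PRP" ∧
         (PySem.List.pyGetD sent i ("", "")).2 = "UNK" ∧
         (PySem.List.pyGetD sent (i + 1) ("", "")).2 = "TO" then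
        PySem.List.pySetD result i ((PySem.List.pyGetD sent i ("", "")).1, "V")
      else result)
    sent

-- ===== PRECONDITION & SPEC =====
def Spec_PRP_UNK_TO_VerbTagger (sent : List (String × String)) (out : List (String × String)) : Prop := out = PRP_UNK_TO_VerbTagger_alt sent
instance (sent : List (String × String)) (out : List (String × String)) : Decidable (Spec_PRP_UNK_TO_VerbTagger sent out) := by unfold Spec_PRP_UNK_TO_VerbTagger; infer_instance

-- ===== CLAIM (what is proved, stated in full; the proofs are below) =====
def Claim_equal_PRP_UNK_TO_VerbTagger : Prop := ∀ (sent : List (String × String)), Dom_PRP_UNK_TO_VerbTagger sent → Spec_PRP_UNK_TO_VerbTagger sent (PRP_UNK_TO_VerbTagger sent)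

-- ===== LEMMAS AND PROOFS =====

-- the three tag tests around position j (no bound checks)
def midCond (sent : List (String × String)) (j : Nat) : Bool :=
  ((sent.getD (j - 1) ("", "")).2 == "PRP") && ((sent.getD j ("", "")).2 == "UNK") &&
  ((sent.getD (j + 1) ("", "")).2 == "TO")

-- `j` is the middle of a PRP-UNK-TO window of `sent`
def midMatch (sent : List (String × String)) (j : Nat) : Bool :=
  decide (1 ≤ j) && decide (j + 1 < sent.length) && midCond sent j

-- the common value of both programs at position j
def outAt (sent : List (String × String)) (j : Nat) : String × String :=
  if midMatch sent j then ((sent.getD j ("", "")).1, "V") else sent.getD j ("", "")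

lemma midMatch_iff (sent : List (String × String)) (j : Nat) :
    midMatch sent j = true ↔
      1 ≤ j ∧ j + 1 < sent.length ∧ (sent.getD (j - 1) ("", "")).2 = "PRP" ∧
      (sent.getD j ("", "")).2 = "UNK" ∧ (sent.getD (j + 1) ("", "")).2 = "TO" := by
  simp [midMatch, midCond, and_assoc]

lemma map_getD_range (l : List (String × String)) :
    (List.range l.length).map (fun j => l.getD j ("", "")) = l := by
  apply List.ext_getElem (by simp)
  intro i h1 h2
  simp [List.getD_eq_getElem?_getD, List.getElem?_eq_getElem h2]

-- ----- A side -----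

-- the loop body of port A, named so the invariant lemma can speak about it
def stepA (sent : List (String × String)) (st : List (String × String) × Int) (i : Int) :
    List (String × String) × Int :=
  let sentToReturn := st.1
  let skip := st.2
  if skip > 0 then (sentToReturn, skip - 1)
  else if i < PySem.Int.bor 0 (i + 2) ∧ PySem.Int.bor 0 (i + 2) ≥ (sent.length : Int) then
    (sentToReturn ++ [PySem.List.pyGetD sent i ("", "")], skip)
  else
    let leftContext := PySem.List.pyGetD sent i ("", "")
    let target := PySem.List.pyGetD sent (i + 1) ("", "")
    let rightContext := PySem.List.pyGetD sent (i + 2) ("", "")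
    if leftContext.2 = "PRP" ∧ target.2 = "UNK" ∧ rightContext.2 = "TO" then
      (sentToReturn ++ [leftContext] ++ [(target.1, "V")] ++ [rightContext], 2)
    else
      (sentToReturn ++ [leftContext], skip)

lemma a_unfold (sent : List (String × String)) :
    PRP_UNK_TO_VerbTagger sent
      = ((PySem.List.pyRange 0 (sent.length : Int) 1).foldl (stepA sent) ([], 0)).1 := rfl

lemma bor_zero_left (z : Int) : PySem.Int.bor 0 z = z := by
  rw [PySem.Int.bor_comm, PySem.Int.bor_zero]

lemma aFold (sent : List (String × String)) :
    ∀ (d i : Nat) (acc : List (String × String)) (skip : Int), i + d = sent.length →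
    ((skip = 0 ∧ acc = (List.range i).map (outAt sent) ∧ midMatch sent i = false) ∨
     (skip = 1 ∧ 1 ≤ i ∧ midMatch sent (i - 1) = true ∧ acc = (List.range (i + 1)).map (outAt sent)) ∨
     (skip = 2 ∧ midMatch sent i = true ∧ acc = (List.range (i + 2)).map (outAt sent))) →
    ((PySem.List.pyRange (i : Int) (sent.length : Int) 1).foldl (stepA sent) (acc, skip)).1
      = (List.range sent.length).map (outAt sent) := by
  intro d
  induction d with
  | zero =>
    intro i acc skip hlen hinv
    have hi : i = sent.length := by omega
    subst hi
    rw [PySem.List.pyRange_one_eq_nil (le_refl _), List.foldl_nil]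
    rcases hinv with ⟨-, hacc, -⟩ | ⟨-, hi1, hm, -⟩ | ⟨-, hm, -⟩
    · exact hacc
    · rw [midMatch_iff] at hm; omega
    · rw [midMatch_iff] at hm; omega
  | succ d ih =>
    intro i acc skip hlen hinv
    have hilt : i < sent.length := by omega
    rw [PySem.List.pyRange_one_cons (by exact_mod_cast hilt), List.foldl_cons,
        show ((i : Int) + 1) = ((i + 1 : Nat) : Int) by push_cast; ring]
    rcases hinv with ⟨h0, hacc, hnm⟩ | ⟨h1, hi1, hm, hacc⟩ | ⟨h2, hm, hacc⟩
    · -- skip = 0: the loop really looks at position i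
      subst h0
      have gi : PySem.List.pyGetD sent (i : Int) ("", "") = sent.getD i ("", "") :=
        PySem.List.pyGetD_natCast sent i ("", "")
      have gi1 : PySem.List.pyGetD sent ((i : Int) + 1) ("", "") = sent.getD (i + 1) ("", "") := by
        rw [show ((i : Int) + 1) = ((i + 1 : Nat) : Int) by push_cast; ring,
            PySem.List.pyGetD_natCast]
      have gi2 : PySem.List.pyGetD sent ((i : Int) + 2) ("", "") = sent.getD (i + 2) ("", "") := by
        rw [show ((i : Int) + 2) = ((i + 2 : Nat) : Int) by push_cast; ring,
            PySem.List.pyGetD_natCast]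
      by_cases hend : sent.length ≤ i + 2
      · -- boundary: just copy sent[i]
        have hstep : stepA sent (acc, 0) (i : Int) = (acc ++ [sent.getD i ("", "")], 0) := by
          unfold stepA
          rw [if_neg (by norm_num), if_pos ⟨by rw [bor_zero_left]; omega, by rw [bor_zero_left]; omega⟩, gi]
        rw [hstep]
        apply ih (i + 1) _ _ (by omega)
        refine Or.inl ⟨rfl, ?_, ?_⟩
        · rw [List.range_succ, List.map_append, hacc]
          simp [outAt, hnm]
        · rw [Bool.eq_false_iff]
          intro hc
          rw [midMatch_iff] at hc
          omega
      · -- interior: test the window starting at i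
        by_cases hmt : (sent.getD i ("", "")).2 = "PRP" ∧ (sent.getD (i + 1) ("", "")).2 = "UNK" ∧
            (sent.getD (i + 2) ("", "")).2 = "TO"
        · -- match: emit three tokens, skip the next two
          have hmid : midMatch sent (i + 1) = true := by
            rw [midMatch_iff]
            exact ⟨by omega, by omega, by simpa using hmt.1, hmt.2.1, by simpa using hmt.2.2⟩
          have hstep : stepA sent (acc, 0) (i : Int)
              = (acc ++ [sent.getD i ("", "")] ++ [((sent.getD (i + 1) ("", "")).1, "V")]
                  ++ [sent.getD (i + 2) ("", "")], 2) := by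
            unfold stepA
            rw [if_neg (by norm_num), if_neg (by rw [bor_zero_left]; omega)]
            simp only [gi, gi1, gi2]
            rw [if_pos hmt]
          rw [hstep]
          apply ih (i + 1) _ _ (by omega)
          refine Or.inr (Or.inr ⟨rfl, hmid, ?_⟩)
          have hnm2 : midMatch sent (i + 2) = false := by
            rw [Bool.eq_false_iff]
            intro hc
            rw [midMatch_iff] at hc
            have := hc.2.2.1
            rw [show i + 2 - 1 = i + 1 from rfl, hmt.2.1] at this
            simp at this
          rw [show i + 1 + 2 = i + 3 from rfl, List.range_succ, List.range_succ, List.range_succ,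
              List.map_append, List.map_append, List.map_append, hacc]
          simp [outAt, hnm, hmid, hnm2]
        · -- no match: copy sent[i]
          have hstep : stepA sent (acc, 0) (i : Int) = (acc ++ [sent.getD i ("", "")], 0) := by
            unfold stepA
            rw [if_neg (by norm_num), if_neg (by rw [bor_zero_left]; omega)]
            simp only [gi, gi1, gi2]
            rw [if_neg hmt]
          rw [hstep]
          apply ih (i + 1) _ _ (by omega)
          refine Or.inl ⟨rfl, ?_, ?_⟩
          · rw [List.range_succ, List.map_append, hacc]
            simp [outAt, hnm]
          · rw [Bool.eq_false_iff]
            intro hc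
            rw [midMatch_iff] at hc
            exact hmt ⟨by simpa using hc.2.2.1, hc.2.2.2.1, hc.2.2.2.2⟩
    · -- skip = 1: last position of a window already emitted
      subst h1
      have hstep : stepA sent (acc, 1) (i : Int) = (acc, 0) := by
        unfold stepA; rw [if_pos (by norm_num)]; norm_num
      rw [hstep]
      apply ih (i + 1) _ _ (by omega)
      refine Or.inl ⟨rfl, hacc, ?_⟩
      rw [Bool.eq_false_iff]
      intro hc
      rw [midMatch_iff] at hm hc
      have hTO : (sent.getD i ("", "")).2 = "TO" := by
        have := hm.2.2.2.2
        rwa [show i - 1 + 1 = i by omega] at this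
      have hPRP : (sent.getD i ("", "")).2 = "PRP" := by
        have := hc.2.2.1
        rwa [Nat.add_sub_cancel] at this
      rw [hTO] at hPRP
      simp at hPRP
    · -- skip = 2: middle position of a window already emitted
      subst h2
      have hstep : stepA sent (acc, 2) (i : Int) = (acc, 1) := by
        unfold stepA; rw [if_pos (by norm_num)]; norm_num
      rw [hstep]
      apply ih (i + 1) _ _ (by omega)
      refine Or.inr (Or.inl ⟨rfl, by omega, by simpa using hm, by rw [hacc]⟩)

theorem portA_eq (sent : List (String × String)) :
    PRP_UNK_TO_VerbTagger sent = (List.range sent.length).map (outAt sent) := by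
  rw [a_unfold]
  have h := aFold sent sent.length 0 [] 0 (by omega)
      (Or.inl ⟨rfl, by simp, by rw [Bool.eq_false_iff]; intro hc; rw [midMatch_iff] at hc; omega⟩)
  simpa using h

-- ----- B side -----

-- the loop body of port B, with the Int index `1 + k` already rewritten to Nat form
def stepB (sent : List (String × String)) (res : List (String × String)) (k : Nat) :
    List (String × String) :=
  if (sent.getD k ("", "")).2 = "PRP" ∧ (sent.getD (k + 1) ("", "")).2 = "UNK" ∧
     (sent.getD (k + 2) ("", "")).2 = "TO" then
    res.set (k + 1) ((sent.getD (k + 1) ("", "")).1, "V")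
  else res

lemma b_unfold (sent : List (String × String)) :
    PRP_UNK_TO_VerbTagger_alt sent
      = (List.range (sent.length - 2)).foldl (stepB sent) sent := by
  unfold PRP_UNK_TO_VerbTagger_alt
  rw [PySem.List.pyRange_one,
      show (((sent.length : Int) - 1) - 1).toNat = sent.length - 2 by omega, List.foldl_map]
  apply PySem.List.foldl_congr_mem
  intro res k _
  rw [show ((1 : Int) + (k : Int) - 1) = ((k : Nat) : Int) by omega,
      show ((1 : Int) + (k : Int) + 1) = ((k + 2 : Nat) : Int) by omega,
      show ((1 : Int) + (k : Int)) = ((k + 1 : Nat) : Int) by omega]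
  simp only [PySem.List.pyGetD_natCast, PySem.List.pySetD_natCast, stepB]

-- what B's result holds at j after the loop has run over k = 0 .. N-1 (windows with middle 1 .. N)
def gB (sent : List (String × String)) (N j : Nat) : String × String :=
  if decide (1 ≤ j) && decide (j ≤ N) && midCond sent j then ((sent.getD j ("", "")).1, "V")
  else sent.getD j ("", "")

lemma gB_succ_ne (sent : List (String × String)) (N j : Nat) (h : j ≠ N + 1) :
    gB sent (N + 1) j = gB sent N j := by
  simp only [gB]
  apply if_congr _ rfl rfl
  simp only [Bool.and_eq_true, decide_eq_true_eq]
  constructor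
  · rintro ⟨⟨h1, h2⟩, h3⟩; exact ⟨⟨h1, by omega⟩, h3⟩
  · rintro ⟨⟨h1, h2⟩, h3⟩; exact ⟨⟨h1, by omega⟩, h3⟩

lemma bFold (sent : List (String × String)) (N : Nat) :
    (List.range N).foldl (stepB sent) sent = (List.range sent.length).map (gB sent N) := by
  induction N with
  | zero =>
    simp only [List.range_zero, List.foldl_nil]
    rw [show (List.range sent.length).map (gB sent 0)
          = (List.range sent.length).map (fun j => sent.getD j ("", "")) from
        List.map_congr_left (by
          intro j hj
          rcases Nat.eq_zero_or_pos j with h | h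
          · subst h; simp [gB]
          · simp [gB, show ¬ j ≤ 0 by omega]), map_getD_range]
  | succ N ih =>
    rw [List.range_succ, List.foldl_append, List.foldl_cons, List.foldl_nil, ih]
    by_cases hC : (sent.getD N ("", "")).2 = "PRP" ∧ (sent.getD (N + 1) ("", "")).2 = "UNK" ∧
        (sent.getD (N + 2) ("", "")).2 = "TO"
    · have hCmid : midCond sent (N + 1) = true := by
        simp only [midCond, Nat.add_sub_cancel, hC.1, hC.2.1, hC.2.2]
        decide
      have hstep : stepB sent ((List.range sent.length).map (gB sent N)) N
          = ((List.range sent.length).map (gB sent N)).set (N + 1)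
              ((sent.getD (N + 1) ("", "")).1, "V") := by
        simp only [stepB]
        rw [if_pos hC]
      rw [hstep]
      apply List.ext_getElem (by simp)
      intro j h1 h2
      simp only [List.length_map, List.length_range] at h2
      rw [List.getElem_set]
      by_cases hj : N + 1 = j
      · subst hj
        rw [if_pos rfl, List.getElem_map, List.getElem_range]
        simp [gB, hCmid]
      · rw [if_neg hj, List.getElem_map, List.getElem_map, List.getElem_range]
        exact (gB_succ_ne sent N j (fun h => hj h.symm)).symm
    · have hCmid : midCond sent (N + 1) = false := by
        rw [Bool.eq_false_iff]
        intro hc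
        simp only [midCond, Nat.add_sub_cancel, Bool.and_eq_true, beq_iff_eq] at hc
        exact hC ⟨hc.1.1, hc.1.2, hc.2⟩
      have hstep : stepB sent ((List.range sent.length).map (gB sent N)) N
          = (List.range sent.length).map (gB sent N) := by
        simp only [stepB]
        rw [if_neg hC]
      rw [hstep]
      apply List.map_congr_left
      intro j hj
      by_cases hj1 : j = N + 1
      · subst hj1; simp [gB, hCmid]
      · exact (gB_succ_ne sent N j hj1).symm

theorem portB_eq (sent : List (String × String)) :
    PRP_UNK_TO_VerbTagger_alt sent = (List.range sent.length).map (outAt sent) := by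
  rw [b_unfold, bFold]
  apply List.map_congr_left
  intro j hj
  rw [List.mem_range] at hj
  simp only [gB, outAt, midMatch]
  apply if_congr _ rfl rfl
  simp only [Bool.and_eq_true, decide_eq_true_eq]
  constructor
  · rintro ⟨⟨h1, h2⟩, h3⟩; exact ⟨⟨h1, by omega⟩, h3⟩
  · rintro ⟨⟨h1, h2⟩, h3⟩; exact ⟨⟨h1, by omega⟩, h3⟩

-- ===== VERDICT (by name: the statement is the Claim_ definition above) =====
theorem PRP_UNK_TO_VerbTagger_spec : Claim_equal_PRP_UNK_TO_VerbTagger := by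
  intro sent _
  unfold Spec_PRP_UNK_TO_VerbTagger
  rw [portA_eq, portB_eq]
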